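-- pv_equiv track=rewrite | github.com/ksw0733/BOJ_Programmers | 백준/Gold/2504. 괄호의 값/괄호의 값.py | solution
-- ===== SOURCE A (Python) =====
-- def solution(string):
--     stack = []
--     ans = 0
--     tmp = 1
--     for i in range(len(string)):
--         if string[i] == '(':
--             tmp *= 2
--             stack.append(string[i])
--
--         elif string[i] == '[':
--             tmp *= 3
--             stack.append(string[i])
--
--         elif string[i] == ')':
--             if not stack or stack[-1] =='[':
--                 return 0
--             if string[i-1] =='(':
--                 ans += tmp
--             stack.pop()
--             tmp //= 2
--
--         elif string[i] == ']':
--             if not stack or stack[-1] == '(':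
--                 return 0
--             if string[i-1] == '[':
--                 ans += tmp
--             stack.pop()
--             tmp //= 3
--     if stack:
--         return 0
--
--     return ans
-- ===== SOURCE B (Python) =====
-- def solution(string):
--     # One stack of tagged entries: (True, m) is an open-bracket marker with
--     # multiplier m; (False, v) is an accumulated sub-value.  No running
--     # multiplier and no running answer are kept.
--     MULT = {'(': 2, '[': 3}
--     MATCH = {')': '(', ']': '['}
--     stack = []
--     prev = ''
--     for ch in string:
--         if ch in MULT:
--             stack.append((True, MULT[ch]))
--         elif ch in MATCH:
--             s = 0
--             while stack and not stack[-1][0]: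
--                 s += stack.pop()[1]
--             if not stack or stack[-1][1] != MULT[MATCH[ch]]:
--                 return 0
--             m = stack.pop()[1]
--             stack.append((False, m if prev == MATCH[ch] else m * s))
--         prev = ch
--     if any(kind for kind, _ in stack):
--         return 0
--     return sum(v for _, v in stack)
-- ===== Notes on version B (the rewrite author's own statement) =====
-- stated objective: alternative
-- what changed: A keeps a character stack plus a running multiplier tmp and a running answer; B keeps a single stack of tagged entries (open-bracket markers with their multiplier, or accumulated integer sub-values), reduces each closed pair to one value pushed back on the stack, and returns the sum of the remaining values.
import Mathlib
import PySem

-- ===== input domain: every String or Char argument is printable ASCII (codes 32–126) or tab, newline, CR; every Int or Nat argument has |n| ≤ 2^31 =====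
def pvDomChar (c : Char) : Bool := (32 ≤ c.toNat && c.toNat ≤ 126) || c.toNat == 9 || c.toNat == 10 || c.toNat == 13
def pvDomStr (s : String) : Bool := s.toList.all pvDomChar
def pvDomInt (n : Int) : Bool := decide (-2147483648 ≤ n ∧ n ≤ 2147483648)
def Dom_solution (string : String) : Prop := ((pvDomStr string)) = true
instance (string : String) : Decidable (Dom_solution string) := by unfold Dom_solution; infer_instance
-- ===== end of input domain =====

-- B replaces A's character stack + running multiplier/answer by a single stack of
-- markers and accumulated sub-values (alternative decomposition, same cost).


-- ===== PORT A =====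
-- A's loop indexes `string[i]` and `string[i-1]`; the port recurses over the char
-- list carrying `prev = string[i-1]` (for i = 0, Python's `string[-1]` is the last
-- character, which is what `prev` is initialised to; exact, since the string is
-- nonempty whenever the loop body runs).  `tmp //= 2` is Python floor division.
def solutionLoopA : List Char → Char → List Char → Int → Int → Int
  | [], _, stack, ans, _ => if stack ≠ [] then 0 else ans
  | c :: rest, prev, stack, ans, tmp =>
    if c = '(' then solutionLoopA rest c ('(' :: stack) ans (tmp * 2)
    else if c = '[' then solutionLoopA rest c ('[' :: stack) ans (tmp * 3)
    else if c = ')' then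
      match stack with
      | [] => 0
      | t :: st =>
        if t = '[' then 0
        else solutionLoopA rest c st (if prev = '(' then ans + tmp else ans)
              (PySem.Int.floordiv tmp 2)
    else if c = ']' then
      match stack with
      | [] => 0
      | t :: st =>
        if t = '(' then 0
        else solutionLoopA rest c st (if prev = '[' then ans + tmp else ans)
              (PySem.Int.floordiv tmp 3)
    else solutionLoopA rest c stack ans tmp

def solution (string : String) : Int :=
  let cs := string.toList
  solutionLoopA cs (cs.getLastD ' ') [] 0 1

-- ===== PORT B =====
-- Stack entries: (true, m) = open-bracket marker with multiplier m; (false, v) = value.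
-- Python's inner `while` popping the values on top of the stack:
def popVals : List (Bool × Int) → Int × List (Bool × Int)
  | [] => (0, [])
  | (true, m) :: rest => (0, (true, m) :: rest)
  | (false, v) :: rest =>
    let p := popVals rest
    (p.1 + v, p.2)

-- `prev` starts as a character that is never consulted on the first step (the
-- Python uses '' there; any close at i = 0 returns 0 before comparing `prev`).
def solutionLoopB : List Char → Char → List (Bool × Int) → Int
  | [], _, stack =>
    if stack.any (fun x => x.1) then 0
    else stack.foldl (fun acc x => acc + x.2) 0
  | c :: rest, _prev, stack =>
    if c = '(' then solutionLoopB rest c ((true, 2) :: stack)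
    else if c = '[' then solutionLoopB rest c ((true, 3) :: stack)
    else if c = ')' ∨ c = ']' then
      let m : Int := if c = ')' then 2 else 3
      let op : Char := if c = ')' then '(' else '['
      let p := popVals stack
      match p.2 with
      | [] => 0
      | (_, mm) :: st' =>
        if mm ≠ m then 0
        else solutionLoopB rest c ((false, if _prev = op then m else m * p.1) :: st')
    else solutionLoopB rest c stack

def solution_alt (string : String) : Int :=
  solutionLoopB string.toList ' ' []

-- ===== PRECONDITION & SPEC =====
def Spec_solution (string : String) (out : Int) : Prop := out = solution_alt string
instance (string : String) (out : Int) : Decidable (Spec_solution string out) := by unfold Spec_solution; infer_instance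

-- ===== CLAIM (what is proved, stated in full; the proofs are below) =====
def Claim_equal_solution : Prop := ∀ (string : String), Dom_solution string → Spec_solution string (solution string)

-- ===== LEMMAS AND PROOFS =====

-- product of the multipliers of the markers in a B-stack
def wm : List (Bool × Int) → Int
  | [] => 1
  | (b, m) :: rest => (if b then m else 1) * wm rest

-- the final contribution of the values already on a B-stack
def contrib : List (Bool × Int) → Int
  | [] => 0
  | (b, v) :: rest => (if b then 0 else v * wm rest) + contrib rest

-- correspondence between A's char stack and B's tagged stack
def SRel : List Char → List (Bool × Int) → Prop
  | [], sb => ∀ x ∈ sb, x.1 = false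
  | c :: st, sb => ∃ vals m sb', (∀ x ∈ vals, x.1 = false) ∧
      sb = vals ++ (true, m) :: sb' ∧
      ((c = '(' ∧ m = 2) ∨ (c = '[' ∧ m = 3)) ∧ SRel st sb'

theorem srel_cons_val (st : List Char) (sb : List (Bool × Int)) (v : Int)
    (h : SRel st sb) : SRel st ((false, v) :: sb) := by
  cases st with
  | nil =>
    intro x hx
    rcases List.mem_cons.mp hx with h1 | h1
    · simp [h1]
    · exact h x h1
  | cons t st2 =>
    obtain ⟨vals, m, sb', hv, hsb, hm, hrest⟩ := h
    exact ⟨(false, v) :: vals, m, sb', by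
      intro x hx
      rcases List.mem_cons.mp hx with h1 | h1
      · simp [h1]
      · exact hv x h1, by simp [hsb], hm, hrest⟩

theorem popVals_vals (vals : List (Bool × Int)) (rest : List (Bool × Int))
    (h : ∀ x ∈ vals, x.1 = false)
    (hr : rest = [] ∨ ∃ m t, rest = (true, m) :: t) :
    popVals (vals ++ rest) = ((vals.map (·.2)).sum, rest) := by
  induction vals with
  | nil =>
    rcases hr with h0 | ⟨m, t, h1⟩
    · simp [h0, popVals]
    · simp [h1, popVals]
  | cons x xs ih =>
    obtain ⟨b, v⟩ := x
    have hb : b = false := h (b, v) (by simp)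
    subst hb
    have := ih (fun x hx => h x (by simp [hx]))
    simp [popVals, this]
    ring

theorem wm_append_vals (vals rest : List (Bool × Int))
    (h : ∀ x ∈ vals, x.1 = false) : wm (vals ++ rest) = wm rest := by
  induction vals with
  | nil => simp
  | cons x xs ih =>
    obtain ⟨b, v⟩ := x
    have hb : b = false := h (b, v) (by simp)
    subst hb
    simp [wm, ih (fun x hx => h x (by simp [hx]))]

theorem contrib_append_vals (vals rest : List (Bool × Int))
    (h : ∀ x ∈ vals, x.1 = false) :
    contrib (vals ++ rest) = (vals.map (·.2)).sum * wm rest + contrib rest := by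
  induction vals with
  | nil => simp
  | cons x xs ih =>
    obtain ⟨b, v⟩ := x
    have hb : b = false := h (b, v) (by simp)
    subst hb
    simp [contrib, ih (fun x hx => h x (by simp [hx])),
          wm_append_vals xs rest (fun x hx => h x (by simp [hx]))]
    ring

theorem contrib_all_vals (l : List (Bool × Int)) (h : ∀ x ∈ l, x.1 = false) :
    contrib l = (l.map (·.2)).sum := by
  have := contrib_append_vals l [] h
  simpa [contrib, wm] using this

theorem foldl_add_vals (l : List (Bool × Int)) (a : Int) :
    l.foldl (fun acc x => acc + x.2) a = a + (l.map (·.2)).sum := by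
  induction l generalizing a with
  | nil => simp
  | cons x xs ih => simp [ih]; ring

theorem floordiv_mul_cancel (m w : Int) (hm : 0 < m) :
    PySem.Int.floordiv (m * w) m = w := by
  rw [PySem.Int.floordiv_eq_ediv_of_pos hm]
  exact Int.mul_ediv_cancel_left w (by omega)

-- step lemmas for the two loops
theorem stepA_close_par (rest : List Char) (prev t : Char) (st : List Char)
    (ans tmp : Int) :
    solutionLoopA (')' :: rest) prev (t :: st) ans tmp =
      if t = '[' then 0 else
        solutionLoopA rest ')' st (if prev = '(' then ans + tmp else ans)
          (PySem.Int.floordiv tmp 2) := by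
  simp [solutionLoopA]

theorem stepA_close_br (rest : List Char) (prev t : Char) (st : List Char)
    (ans tmp : Int) :
    solutionLoopA (']' :: rest) prev (t :: st) ans tmp =
      if t = '(' then 0 else
        solutionLoopA rest ']' st (if prev = '[' then ans + tmp else ans)
          (PySem.Int.floordiv tmp 3) := by
  simp [solutionLoopA]

theorem stepA_other (rest : List Char) (c prev : Char) (stack : List Char)
    (ans tmp : Int) (h1 : c ≠ '(') (h2 : c ≠ '[') (h3 : c ≠ ')') (h4 : c ≠ ']') :
    solutionLoopA (c :: rest) prev stack ans tmp =
      solutionLoopA rest c stack ans tmp := by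
  simp [solutionLoopA, h1, h2, h3, h4]

theorem stepB_close_par_nil (rest : List Char) (prev : Char)
    (stack : List (Bool × Int)) (h : (popVals stack).2 = []) :
    solutionLoopB (')' :: rest) prev stack = 0 := by
  simp [solutionLoopB, h]

theorem stepB_close_br_nil (rest : List Char) (prev : Char)
    (stack : List (Bool × Int)) (h : (popVals stack).2 = []) :
    solutionLoopB (']' :: rest) prev stack = 0 := by
  simp [solutionLoopB, h]

theorem stepB_close_par_cons (rest : List Char) (prev : Char)
    (stack : List (Bool × Int)) (s mm : Int) (b : Bool) (t : List (Bool × Int))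
    (h : popVals stack = (s, (b, mm) :: t)) :
    solutionLoopB (')' :: rest) prev stack =
      if mm ≠ 2 then 0
      else solutionLoopB rest ')' ((false, if prev = '(' then 2 else 2 * s) :: t) := by
  simp [solutionLoopB, h]

theorem stepB_close_br_cons (rest : List Char) (prev : Char)
    (stack : List (Bool × Int)) (s mm : Int) (b : Bool) (t : List (Bool × Int))
    (h : popVals stack = (s, (b, mm) :: t)) :
    solutionLoopB (']' :: rest) prev stack =
      if mm ≠ 3 then 0
      else solutionLoopB rest ']' ((false, if prev = '[' then 3 else 3 * s) :: t) := by
  simp [solutionLoopB, h]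

theorem stepB_other (rest : List Char) (c prev : Char) (stack : List (Bool × Int))
    (h1 : c ≠ '(') (h2 : c ≠ '[') (h3 : c ≠ ')') (h4 : c ≠ ']') :
    solutionLoopB (c :: rest) prev stack = solutionLoopB rest c stack := by
  simp [solutionLoopB, h1, h2, h3, h4]

-- main invariant lemma: with related states and equal prev, the loops agree
theorem loops_eq (cs : List Char) (prev : Char) (stA : List Char)
    (stB : List (Bool × Int))
    (hrel : SRel stA stB)
    (h4 : prev = '(' → stB.head? = some (true, 2))
    (h5 : prev = '[' → stB.head? = some (true, 3)) :
    solutionLoopA cs prev stA (contrib stB) (wm stB) = solutionLoopB cs prev stB := by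
  induction cs generalizing prev stA stB with
  | nil =>
    cases stA with
    | nil =>
      have hall : ∀ x ∈ stB, x.1 = false := hrel
      have hany : stB.any (fun x => x.1) = false := by
        simp only [List.any_eq_false]
        intro x hx; simp [hall x hx]
      simp [solutionLoopA, solutionLoopB, hany, contrib_all_vals stB hall,
        foldl_add_vals]
    | cons t st =>
      obtain ⟨vals, m, sb', hv, hsb, hm, hrest⟩ := hrel
      have : stB.any (fun x => x.1) = true := by subst hsb; simp
      simp [solutionLoopA, solutionLoopB, this]
  | cons c rest ih =>
    by_cases hop : c = '('
    · subst hop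
      have h1 : contrib ((true, (2:Int)) :: stB) = contrib stB := by simp [contrib]
      have h2 : wm stB * 2 = wm ((true, (2:Int)) :: stB) := by simp [wm]; ring
      simp only [solutionLoopA, solutionLoopB]
      rw [h2, ← h1]
      exact ih '(' ('(' :: stA) ((true, 2) :: stB)
        ⟨[], 2, stB, by simp, by simp, by simp, hrel⟩ (by simp) (by simp)
    · by_cases hob : c = '['
      · subst hob
        have h1 : contrib ((true, (3:Int)) :: stB) = contrib stB := by simp [contrib]
        have h2 : wm stB * 3 = wm ((true, (3:Int)) :: stB) := by simp [wm]; ring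
        rw [show solutionLoopA ('[' :: rest) prev stA (contrib stB) (wm stB) =
              solutionLoopA rest '[' ('[' :: stA) (contrib stB) (wm stB * 3) by
            simp [solutionLoopA],
          show solutionLoopB ('[' :: rest) prev stB =
              solutionLoopB rest '[' ((true, 3) :: stB) by simp [solutionLoopB],
          h2, ← h1]
        exact ih '[' ('[' :: stA) ((true, 3) :: stB)
          ⟨[], 3, stB, by simp, by simp, by simp, hrel⟩ (by simp) (by simp)
      · by_cases hcl : c = ')' ∨ c = ']'
        · -- closing bracket
          cases stA with
          | nil =>
            have hall : ∀ x ∈ stB, x.1 = false := hrel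
            have hpop : popVals stB = ((stB.map (·.2)).sum, []) := by
              have := popVals_vals stB [] hall (Or.inl rfl)
              simpa using this
            rcases hcl with h | h <;> subst h
            · rw [stepB_close_par_nil rest prev stB (by simp [hpop])]
              simp [solutionLoopA]
            · rw [stepB_close_br_nil rest prev stB (by simp [hpop])]
              simp [solutionLoopA]
          | cons t st =>
            obtain ⟨vals, m, sb', hv, hsb, hm, hrest⟩ := hrel
            subst hsb
            have hpop : popVals (vals ++ (true, m) :: sb') =
                ((vals.map (·.2)).sum, (true, m) :: sb') :=
              popVals_vals vals _ hv (Or.inr ⟨m, sb', rfl⟩)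
            have hwm : wm (vals ++ (true, m) :: sb') = m * wm sb' := by
              rw [wm_append_vals vals _ hv]; simp [wm]
            have hcon : contrib (vals ++ (true, m) :: sb') =
                (vals.map (·.2)).sum * (m * wm sb') + contrib sb' := by
              rw [contrib_append_vals vals _ hv]; simp [contrib, wm]; try ring
            rcases hm with ⟨ht, hmv⟩ | ⟨ht, hmv⟩ <;> subst ht <;> subst hmv <;>
              rcases hcl with h | h <;> subst h
            · -- t = '(' , c = ')' : both proceed
              rw [stepA_close_par, stepB_close_par_cons rest prev _ _ _ _ _ hpop,
                if_neg (by decide : ¬('(' = '[')),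
                if_neg (by norm_num : ¬((2:Int) ≠ 2))]
              by_cases hprev : prev = '('
              · have hvals : vals = [] := by
                  have hh := h4 hprev
                  cases vals with
                  | nil => rfl
                  | cons x xs =>
                    obtain ⟨b, v⟩ := x
                    have hb : b = false := hv (b, v) (by simp)
                    subst hb
                    simp at hh
                subst hvals
                simp only [List.nil_append] at hwm hcon ⊢
                rw [if_pos hprev, if_pos hprev, hcon, hwm,
                  show (List.map (fun x => x.2) ([] : List (Bool × Int))).sum * (2 * wm sb') +
                      contrib sb' + 2 * wm sb' = contrib ((false, (2:Int)) :: sb') by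
                    simp [contrib]; ring,
                  show PySem.Int.floordiv (2 * wm sb') 2 = wm ((false, (2:Int)) :: sb') by
                    rw [floordiv_mul_cancel 2 (wm sb') (by norm_num)]; simp [wm]]
                exact ih ')' st ((false, 2) :: sb') (srel_cons_val st sb' 2 hrest)
                  (by simp) (by simp)
              · rw [if_neg hprev, if_neg hprev, hcon, hwm,
                  show (List.map (fun x => x.2) vals).sum * (2 * wm sb') + contrib sb' =
                      contrib ((false, 2 * (List.map (fun x => x.2) vals).sum) :: sb') by
                    simp [contrib]; ring,
                  show PySem.Int.floordiv (2 * wm sb') 2 =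
                      wm ((false, 2 * (List.map (fun x => x.2) vals).sum) :: sb') by
                    rw [floordiv_mul_cancel 2 (wm sb') (by norm_num)]; simp [wm]]
                exact ih ')' st ((false, 2 * (List.map (fun x => x.2) vals).sum) :: sb')
                  (srel_cons_val st sb' _ hrest) (by simp) (by simp)
            · -- t = '(' , c = ']' : both return 0
              rw [stepA_close_br, stepB_close_br_cons rest prev _ _ _ _ _ hpop]
              simp
            · -- t = '[' , c = ')' : both return 0
              rw [stepA_close_par, stepB_close_par_cons rest prev _ _ _ _ _ hpop]
              simp
            · -- t = '[' , c = ']' : both proceed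
              rw [stepA_close_br, stepB_close_br_cons rest prev _ _ _ _ _ hpop,
                if_neg (by decide : ¬('[' = '(')),
                if_neg (by norm_num : ¬((3:Int) ≠ 3))]
              by_cases hprev : prev = '['
              · have hvals : vals = [] := by
                  have hh := h5 hprev
                  cases vals with
                  | nil => rfl
                  | cons x xs =>
                    obtain ⟨b, v⟩ := x
                    have hb : b = false := hv (b, v) (by simp)
                    subst hb
                    simp at hh
                subst hvals
                simp only [List.nil_append] at hwm hcon ⊢
                rw [if_pos hprev, if_pos hprev, hcon, hwm,
                  show (List.map (fun x => x.2) ([] : List (Bool × Int))).sum * (3 * wm sb') +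
                      contrib sb' + 3 * wm sb' = contrib ((false, (3:Int)) :: sb') by
                    simp [contrib]; ring,
                  show PySem.Int.floordiv (3 * wm sb') 3 = wm ((false, (3:Int)) :: sb') by
                    rw [floordiv_mul_cancel 3 (wm sb') (by norm_num)]; simp [wm]]
                exact ih ']' st ((false, 3) :: sb') (srel_cons_val st sb' 3 hrest)
                  (by simp) (by simp)
              · rw [if_neg hprev, if_neg hprev, hcon, hwm,
                  show (List.map (fun x => x.2) vals).sum * (3 * wm sb') + contrib sb' =
                      contrib ((false, 3 * (List.map (fun x => x.2) vals).sum) :: sb') by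
                    simp [contrib]; ring,
                  show PySem.Int.floordiv (3 * wm sb') 3 =
                      wm ((false, 3 * (List.map (fun x => x.2) vals).sum) :: sb') by
                    rw [floordiv_mul_cancel 3 (wm sb') (by norm_num)]; simp [wm]]
                exact ih ']' st ((false, 3 * (List.map (fun x => x.2) vals).sum) :: sb')
                  (srel_cons_val st sb' _ hrest) (by simp) (by simp)
        · -- any other character
          have hcl2 := not_or.mp hcl
          rw [stepA_other rest c prev stA _ _ hop hob hcl2.1 hcl2.2,
            stepB_other rest c prev stB hop hob hcl2.1 hcl2.2]
          exact ih c stA stB hrel (fun h => absurd h hop) (fun h => absurd h hob)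

-- ===== VERDICT (by name: the statement is the Claim_ definition above) =====
theorem solution_spec : Claim_equal_solution := by
  intro s _
  unfold Spec_solution solution solution_alt
  cases hcs : s.toList with
  | nil => simp [solutionLoopA, solutionLoopB]
  | cons c rest =>
    -- do the first step by hand: A's initial prev (string[-1]) and B's (' ') may
    -- differ, but neither loop consults prev while the stacks are empty
    by_cases hop : c = '('
    · subst hop
      simp only [solutionLoopA, solutionLoopB]
      have := loops_eq rest '(' ['('] [(true, 2)]
        ⟨[], 2, [], by simp, by simp, by simp, by intro x hx; simp at hx⟩
        (by simp) (by simp)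
      simpa [contrib, wm] using this
    · by_cases hob : c = '['
      · subst hob
        rw [show ∀ prev ans tmp, solutionLoopA ('[' :: rest) prev [] ans tmp =
              solutionLoopA rest '[' ['['] ans (tmp * 3) from by
            intro prev ans tmp; simp [solutionLoopA],
          show ∀ prev, solutionLoopB ('[' :: rest) prev [] =
              solutionLoopB rest '[' [(true, 3)] from by
            intro prev; simp [solutionLoopB]]
        have := loops_eq rest '[' ['['] [(true, 3)]
          ⟨[], 3, [], by simp, by simp, by simp, by intro x hx; simp at hx⟩
          (by simp) (by simp)
        simpa [contrib, wm] using this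
      · by_cases hcp : c = ')'
        · subst hcp
          simp [solutionLoopA, solutionLoopB, popVals]
        · by_cases hcb : c = ']'
          · subst hcb
            simp [solutionLoopA, solutionLoopB, popVals]
          · rw [stepA_other rest c _ [] 0 1 hop hob hcp hcb,
              stepB_other rest c ' ' [] hop hob hcp hcb]
            have := loops_eq rest c [] []
              (by intro x hx; simp at hx)
              (fun h => absurd h hop) (fun h => absurd h hob)
            simpa [contrib, wm] using this
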